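-- pv_equiv track=rewrite | github.com/cs79/mta | afe.py | _col_streak
-- ===== SOURCE A (Python) =====
-- def _col_streak(l):
--     assert type(l) == list, 'l must be a list'
--     tr = [0]
--     sl = ['z']
--     for i in range(1, len(l)):
--         # up case
--         if l[i] >= l[i-1]:
--             if sl[i-1] in ('z', 'u'):
--                 tr.append(tr[i-1] + 1)
--             else:
--                 tr.append(1)
--             sl.append('u')
--         # down case
--         else:
--             if sl[i-1] in ('z', 'd'):
--                 tr.append(tr[i-1] - 1)
--             else:
--                 tr.append(-1)
--             sl.append('d')
--     return tr
-- ===== SOURCE B (Python) =====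
-- def _col_streak(l):
--     assert type(l) == list, 'l must be a list'
--     # phase 1: direction table, one entry per adjacent pair
--     dirs = [b >= a for a, b in zip(l, l[1:])]
--     # phase 2: walk maximal runs of equal direction, emitting 1..k / -1..-k
--     tr = [0]
--     i = 0
--     while i < len(dirs):
--         j = i
--         while j < len(dirs) and dirs[j] == dirs[i]:
--             j += 1
--         k = j - i
--         tr.extend(range(1, k + 1) if dirs[i] else range(-1, -k - 1, -1))
--         i = j
--     return tr
-- ===== Notes on version B (the rewrite author's own statement) =====
-- stated objective: alternative
-- what changed: Replaces A's single coupled pass that indexes parallel tr/sl lists with a two-phase algorithm: first build a direction table from adjacent pairs, then walk maximal runs of equal direction and emit 1..k / -1..-k per run.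
import Mathlib
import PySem

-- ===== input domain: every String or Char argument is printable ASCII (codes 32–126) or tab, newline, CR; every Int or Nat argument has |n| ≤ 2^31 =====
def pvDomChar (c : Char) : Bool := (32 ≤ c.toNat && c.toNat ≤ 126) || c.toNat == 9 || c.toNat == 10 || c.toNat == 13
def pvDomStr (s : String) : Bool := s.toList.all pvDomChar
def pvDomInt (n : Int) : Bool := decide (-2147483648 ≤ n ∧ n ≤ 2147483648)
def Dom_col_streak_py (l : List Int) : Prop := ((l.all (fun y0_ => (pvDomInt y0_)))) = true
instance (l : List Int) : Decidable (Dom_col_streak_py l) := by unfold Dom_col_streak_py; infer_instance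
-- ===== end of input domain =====

-- B rebuilds the streak counters from a direction table plus a run-walking pass
-- instead of A's coupled indexed pass; alternative decomposition, same cost.

-- ===== PORT A =====
-- one iteration of A's for-loop body; state = (tr, sl)
def aStep (l : List Int) (st : List Int × List Char) (i : Int) : List Int × List Char :=
  let tr := st.1
  let sl := st.2
  if PySem.List.pyGetD l i 0 ≥ PySem.List.pyGetD l (i - 1) 0 then
    if PySem.List.pyGetD sl (i - 1) 'z' = 'z' ∨ PySem.List.pyGetD sl (i - 1) 'z' = 'u' then
      (tr ++ [PySem.List.pyGetD tr (i - 1) 0 + 1], sl ++ ['u'])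
    else
      (tr ++ [1], sl ++ ['u'])
  else
    if PySem.List.pyGetD sl (i - 1) 'z' = 'z' ∨ PySem.List.pyGetD sl (i - 1) 'z' = 'd' then
      (tr ++ [PySem.List.pyGetD tr (i - 1) 0 - 1], sl ++ ['d'])
    else
      (tr ++ [-1], sl ++ ['d'])

def col_streak_py (l : List Int) : List Int :=
  ((PySem.List.pyRange 1 l.length 1).foldl (aStep l) ([0], ['z'])).1

-- ===== PORT B =====
-- the numbers emitted for one maximal run of k equal directions: 1..k or -1..-k
def runSeg (d : Bool) (k : Nat) : List Int :=
  if d then (List.range k).map (fun i : Nat => (i : Int) + 1)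
  else (List.range k).map (fun i : Nat => -((i : Int) + 1))

-- phase 2 of B: walk maximal runs of equal direction
def runsEmit : List Bool → List Int
  | [] => []
  | d :: rest =>
      runSeg d (1 + (rest.takeWhile (· == d)).length) ++ runsEmit (rest.dropWhile (· == d))
  termination_by ds => ds.length
  decreasing_by
    simpa using Nat.lt_succ_of_le (List.length_dropWhile_le (· == d) rest)

def col_streak_py_alt (l : List Int) : List Int :=
  0 :: runsEmit ((l.zip l.tail).map (fun p => decide (p.2 ≥ p.1)))

-- ===== PRECONDITION & SPEC =====
def Spec_col_streak_py (l : List Int) (out : List Int) : Prop := out = col_streak_py_alt l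
instance (l : List Int) (out : List Int) : Decidable (Spec_col_streak_py l out) := by unfold Spec_col_streak_py; infer_instance

-- ===== CLAIM (what is proved, stated in full; the proofs are below) =====
def Claim_equal_col_streak_py : Prop := ∀ (l : List Int), Dom_col_streak_py l → Spec_col_streak_py l (col_streak_py l)

-- ===== LEMMAS AND PROOFS =====

-- the direction table of a list
def dirs (l : List Int) : List Bool :=
  (l.zip l.tail).map (fun p => decide (p.2 ≥ p.1))

-- reference scalar-state streak function both sides are reduced to
def sref : Char → Int → List Bool → List Int
  | _, _, [] => []
  | c, v, true :: rest =>
      if c = 'z' ∨ c = 'u' then (v + 1) :: sref 'u' (v + 1) rest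
      else (1 : Int) :: sref 'u' 1 rest
  | c, v, false :: rest =>
      if c = 'z' ∨ c = 'd' then (v - 1) :: sref 'd' (v - 1) rest
      else (-1 : Int) :: sref 'd' (-1) rest

theorem dirs_length (l : List Int) : (dirs l).length = l.length - 1 := by
  simp [dirs, List.length_zip, List.length_tail]

theorem dirs_getElem (l : List Int) (j : Nat) (h : j < (dirs l).length) :
    (dirs l)[j] = decide (l[j+1]?.getD 0 ≥ l[j]?.getD 0) := by
  have hl := dirs_length l
  have hj1 : j + 1 < l.length := by omega
  have hj : j < l.length := by omega
  have hjz : j < (l.zip l.tail).length := by simpa [dirs] using h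
  simp [dirs, List.getElem_zip, List.getElem_tail,
    List.getElem?_eq_getElem hj, List.getElem?_eq_getElem hj1]

theorem aFold (l : List Int) : ∀ (fuel i : Nat), l.length - i ≤ fuel → 1 ≤ i → i ≤ l.length →
    ∀ (tr : List Int) (sl : List Char),
    tr.length = i → sl.length = i →
    ((PySem.List.pyRange (i : Int) (l.length : Int) 1).foldl (aStep l) (tr, sl)).1
      = tr ++ sref (sl.getLast?.getD 'z') (tr.getLast?.getD 0) ((dirs l).drop (i - 1)) := by
  intro fuel
  induction fuel with
  | zero =>
      intro i hfuel hi1 hi2 tr sl htr hsl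
      have hle : ((l.length : Int)) ≤ (i : Int) := by omega
      rw [PySem.List.pyRange_one_eq_nil hle]
      have hdl := dirs_length l
      have hd : (dirs l).drop (i - 1) = [] := List.drop_eq_nil_of_le (by omega)
      simp [hd, sref]
  | succ fuel ih =>
      intro i hfuel hi1 hi2 tr sl htr hsl
      by_cases hlt : i < l.length
      · have hcast : ((i : Int)) < (l.length : Int) := by exact_mod_cast hlt
        rw [PySem.List.pyRange_one_cons hcast, List.foldl_cons]
        have hcasti : (i : Int) - 1 = ((i - 1 : Nat) : Int) := by omega
        have hgl : PySem.List.pyGetD l (i : Int) 0 = l[i]?.getD 0 := by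
          simp [List.getD_eq_getElem?_getD]
        have hgl' : PySem.List.pyGetD l ((i : Int) - 1) 0 = l[i-1]?.getD 0 := by
          rw [hcasti]; simp [List.getD_eq_getElem?_getD]
        have hgs : PySem.List.pyGetD sl ((i : Int) - 1) 'z' = sl.getLast?.getD 'z' := by
          rw [hcasti]; simp only [PySem.List.pyGetD_natCast]
          rw [List.getLast?_eq_getElem?, List.getD_eq_getElem?_getD, hsl]
        have hgt : PySem.List.pyGetD tr ((i : Int) - 1) 0 = tr.getLast?.getD 0 := by
          rw [hcasti]; simp only [PySem.List.pyGetD_natCast]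
          rw [List.getLast?_eq_getElem?, List.getD_eq_getElem?_getD, htr]
        have hA : aStep l (tr, sl) (i : Int) =
            if l[i]?.getD 0 ≥ l[i-1]?.getD 0 then
              (if sl.getLast?.getD 'z' = 'z' ∨ sl.getLast?.getD 'z' = 'u' then
                 (tr ++ [tr.getLast?.getD 0 + 1], sl ++ ['u'])
               else (tr ++ [1], sl ++ ['u']))
            else
              (if sl.getLast?.getD 'z' = 'z' ∨ sl.getLast?.getD 'z' = 'd' then
                 (tr ++ [tr.getLast?.getD 0 - 1], sl ++ ['d'])
               else (tr ++ [-1], sl ++ ['d'])) := by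
          simp only [aStep]; rw [hgl, hgl', hgs, hgt]
        have hdl := dirs_length l
        have hjd : i - 1 < (dirs l).length := by omega
        have him : i - 1 + 1 = i := by omega
        have hdget : (dirs l)[i-1] = decide (l[i]?.getD 0 ≥ l[i-1]?.getD 0) := by
          have h := dirs_getElem l (i-1) hjd
          rw [him] at h; exact h
        have hdrop : (dirs l).drop (i - 1) = (dirs l)[i-1] :: (dirs l).drop i := by
          rw [List.drop_eq_getElem_cons hjd, him]
        have hcast2 : (i : Int) + 1 = ((i + 1 : Nat) : Int) := by omega
        by_cases hdc : l[i]?.getD 0 ≥ l[i-1]?.getD 0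
        · rw [if_pos hdc] at hA
          have hdt : (dirs l)[i-1] = true := by rw [hdget]; simpa using hdc
          rw [hdrop, hdt]
          by_cases hz : sl.getLast?.getD 'z' = 'z' ∨ sl.getLast?.getD 'z' = 'u'
          · rw [if_pos hz] at hA
            rw [hA, hcast2,
              ih (i+1) (by omega) (by omega) hlt _ _ (by simp [htr]) (by simp [hsl])]
            simp only [List.getLast?_concat, Option.getD_some, Nat.add_sub_cancel]
            rw [sref, if_pos hz]
            simp
          · rw [if_neg hz] at hA
            rw [hA, hcast2,
              ih (i+1) (by omega) (by omega) hlt _ _ (by simp [htr]) (by simp [hsl])]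
            simp only [List.getLast?_concat, Option.getD_some, Nat.add_sub_cancel]
            rw [sref, if_neg hz]
            simp
        · rw [if_neg hdc] at hA
          have hdt : (dirs l)[i-1] = false := by rw [hdget]; simpa using hdc
          rw [hdrop, hdt]
          by_cases hz : sl.getLast?.getD 'z' = 'z' ∨ sl.getLast?.getD 'z' = 'd'
          · rw [if_pos hz] at hA
            rw [hA, hcast2,
              ih (i+1) (by omega) (by omega) hlt _ _ (by simp [htr]) (by simp [hsl])]
            simp only [List.getLast?_concat, Option.getD_some, Nat.add_sub_cancel]
            rw [sref, if_pos hz]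
            simp
          · rw [if_neg hz] at hA
            rw [hA, hcast2,
              ih (i+1) (by omega) (by omega) hlt _ _ (by simp [htr]) (by simp [hsl])]
            simp only [List.getLast?_concat, Option.getD_some, Nat.add_sub_cancel]
            rw [sref, if_neg hz]
            simp
      · have hle : ((l.length : Int)) ≤ (i : Int) := by omega
        rw [PySem.List.pyRange_one_eq_nil hle]
        have hdl := dirs_length l
        have hd : (dirs l).drop (i - 1) = [] := List.drop_eq_nil_of_le (by omega)
        simp [hd, sref]

theorem colA_eq_sref (l : List Int) : col_streak_py l = 0 :: sref 'z' 0 (dirs l) := by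
  unfold col_streak_py
  by_cases h : l.length = 0
  · have hnil : (dirs l) = [] := List.eq_nil_of_length_eq_zero (by rw [dirs_length]; omega)
    rw [h, PySem.List.pyRange_one_eq_nil (by norm_num)]
    simp [hnil, sref]
  · have := aFold l l.length 1 (by omega) (by omega) (by omega) [0] ['z'] rfl rfl
    simpa using this

-- takeWhile (· == d) yields a replicate of d
theorem takeWhile_eq_replicate (d : Bool) : ∀ (xs : List Bool),
    xs.takeWhile (· == d) = List.replicate (xs.takeWhile (· == d)).length d := by
  intro xs
  induction xs with
  | nil => simp
  | cons x t ih =>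
      by_cases hx : x = d
      · subst hx; simpa [List.takeWhile_cons, List.replicate_succ] using ih
      · simp [hx]

-- inside an up-run the streak keeps incrementing
theorem sref_run_true : ∀ (k : Nat) (v : Int) (rest : List Bool),
    sref 'u' v (List.replicate k true ++ rest)
      = (List.range k).map (fun i : Nat => v + (i : Int) + 1) ++ sref 'u' (v + k) rest := by
  intro k
  induction k with
  | zero => intro v rest; simp
  | succ k ih =>
      intro v rest
      rw [List.replicate_succ, List.cons_append, sref, if_pos (Or.inr rfl), ih (v+1) rest]
      rw [List.range_succ_eq_map, List.map_cons, List.map_map]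
      have hmap : (List.range k).map (fun i : Nat => v + 1 + (i : Int) + 1)
          = (List.range k).map ((fun i : Nat => v + (i : Int) + 1) ∘ Nat.succ) := by
        apply List.map_congr_left
        intro i _
        simp [Function.comp]
        ring
      rw [hmap]
      have hv : v + 1 + (k : Int) = v + ((k + 1 : Nat) : Int) := by push_cast; ring
      rw [hv]
      norm_num

-- inside a down-run the streak keeps decrementing
theorem sref_run_false : ∀ (k : Nat) (v : Int) (rest : List Bool),
    sref 'd' v (List.replicate k false ++ rest)
      = (List.range k).map (fun i : Nat => v - (i : Int) - 1) ++ sref 'd' (v - k) rest := by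
  intro k
  induction k with
  | zero => intro v rest; simp
  | succ k ih =>
      intro v rest
      rw [List.replicate_succ, List.cons_append, sref, if_pos (Or.inr rfl), ih (v-1) rest]
      rw [List.range_succ_eq_map, List.map_cons, List.map_map]
      have hmap : (List.range k).map (fun i : Nat => v - 1 - (i : Int) - 1)
          = (List.range k).map ((fun i : Nat => v - (i : Int) - 1) ∘ Nat.succ) := by
        apply List.map_congr_left
        intro i _
        simp [Function.comp]
        ring
      rw [hmap]
      have hv : v - 1 - (k : Int) = v - ((k + 1 : Nat) : Int) := by push_cast; ring
      rw [hv]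
      norm_num

-- when the direction flips, the state resets as if fresh
theorem sref_reset_u (v : Int) (t : List Bool) :
    sref 'u' v (false :: t) = sref 'z' 0 (false :: t) := by
  rw [sref, if_neg (by decide), sref, if_pos (Or.inl rfl)]
  norm_num

theorem sref_reset_d (v : Int) (t : List Bool) :
    sref 'd' v (true :: t) = sref 'z' 0 (true :: t) := by
  rw [sref, if_neg (by decide), sref, if_pos (Or.inl rfl)]
  norm_num

-- head of dropWhile fails the predicate
theorem dropWhile_head_ne (d : Bool) (xs : List Bool) (e : Bool) (t : List Bool)
    (h : xs.dropWhile (· == d) = e :: t) : e ≠ d := by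
  have := List.head?_dropWhile_not (· == d) xs
  rw [h] at this
  simpa using this

theorem runsEmit_eq_sref : ∀ (ds : List Bool), runsEmit ds = sref 'z' 0 ds := by
  intro ds
  induction hn : ds.length using Nat.strong_induction_on generalizing ds with
  | _ n ih =>
    cases ds with
    | nil => simp [runsEmit, sref]
    | cons d rest =>
        rw [runsEmit]
        have hrest : rest = List.replicate (rest.takeWhile (· == d)).length d
            ++ rest.dropWhile (· == d) := by
          conv_lhs => rw [← List.takeWhile_append_dropWhile (p := (· == d)) (l := rest)]
          rw [← takeWhile_eq_replicate]
        have hdrop_lt : (rest.dropWhile (· == d)).length < n := by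
          have := List.length_dropWhile_le (· == d) rest
          subst hn; simp; omega
        have htail : ∀ (w : Int), sref (if d then 'u' else 'd') w (rest.dropWhile (· == d))
            = runsEmit (rest.dropWhile (· == d)) := by
          intro w
          cases hdw : rest.dropWhile (· == d) with
          | nil => cases d <;> simp [runsEmit, sref]
          | cons e t =>
              have hne : e ≠ d := dropWhile_head_ne d rest e t hdw
              have hih := ih _ hdrop_lt (rest.dropWhile (· == d)) rfl
              rw [hdw] at hih
              rw [hih]
              cases d
              · have he : e = true := by
                  cases e with
                  | false => exact absurd rfl hne
                  | true => rfl
                subst he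
                exact sref_reset_d w t
              · have he : e = false := by
                  cases e with
                  | false => rfl
                  | true => exact absurd rfl hne
                subst he
                exact sref_reset_u w t
        conv_rhs => rw [hrest]
        set k0 := (rest.takeWhile (· == d)).length with hk0
        cases d
        · simp only [Bool.false_eq_true, if_false] at htail
          rw [sref, if_pos (Or.inl rfl), sref_run_false, htail (0 - 1 - k0),
            ← List.cons_append]
          congr 1
          rw [runSeg]
          simp only [Bool.false_eq_true, if_false, Nat.add_comm 1 k0]
          rw [List.range_succ_eq_map, List.map_cons, List.map_map]
          congr 1
          all_goals try norm_num
          all_goals intro a _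

          all_goals ring
        · simp only [if_true] at htail
          rw [sref, if_pos (Or.inl rfl), sref_run_true, htail (0 + 1 + k0),
            ← List.cons_append]
          congr 1
          rw [runSeg]
          simp only [if_true, Nat.add_comm 1 k0]
          rw [List.range_succ_eq_map, List.map_cons, List.map_map]
          congr 1
          all_goals try norm_num
          all_goals intro a _

          all_goals ring

-- ===== VERDICT (by name: the statement is the Claim_ definition above) =====
theorem col_streak_py_spec : Claim_equal_col_streak_py := by
  intro l _
  unfold Spec_col_streak_py col_streak_py_alt
  rw [colA_eq_sref, ← runsEmit_eq_sref]
  rfl
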